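-- pv_equiv track=rewrite | github.com/cbohara/automate_the_boring_stuff | app_execution_memory_csv.py | filter_by_node
-- ===== SOURCE A (Python) =====
-- def filter_by_node(matrix, nodes):
--     # add times for node to its own array, and then add to final output matrix
--     final_output = []
--     for node in nodes:
--         node_array =[node]
--         for row in matrix:
--             if node == row[0]:
--                 node_array.append(row[2])
--         final_output.append(node_array)
--     return final_output
-- ===== SOURCE B (Python) =====
-- def filter_by_node(matrix, nodes):
--     # Nothing requested: skip the matrix scan entirely.
--     if not nodes:
--         return []
--     # One pass over matrix: group row[2] values by row[0] (only for wanted ids),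
--     # then one lookup per node.
--     wanted = set(nodes)
--     groups = {}
--     for row in matrix:
--         if row[0] in wanted:
--             groups.setdefault(row[0], []).append(row[2])
--     return [[node] + groups.get(node, []) for node in nodes]
-- ===== Notes on version B (the rewrite author's own statement) =====
-- stated objective: alternative
-- what changed: Replaces the nested loop (a full scan of matrix per node) by a single pass that groups row[2] values by row[0] in a dict, followed by one lookup per node.
import Mathlib
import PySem

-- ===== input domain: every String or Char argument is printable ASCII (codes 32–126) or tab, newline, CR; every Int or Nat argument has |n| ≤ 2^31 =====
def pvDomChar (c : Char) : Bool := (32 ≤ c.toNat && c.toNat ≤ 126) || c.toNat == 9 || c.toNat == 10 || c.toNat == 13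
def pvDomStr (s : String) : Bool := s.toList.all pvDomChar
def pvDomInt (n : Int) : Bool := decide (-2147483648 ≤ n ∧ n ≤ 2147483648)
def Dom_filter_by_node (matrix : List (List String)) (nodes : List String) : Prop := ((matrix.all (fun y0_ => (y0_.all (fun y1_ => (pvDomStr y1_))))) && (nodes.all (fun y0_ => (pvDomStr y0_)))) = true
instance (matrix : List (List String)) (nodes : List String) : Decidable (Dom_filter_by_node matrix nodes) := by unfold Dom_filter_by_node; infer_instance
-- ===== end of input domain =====

-- ===== PORT A =====
-- B replaces A's per-node scan of matrix by one dict-grouping pass over matrix plus a lookup per node.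
def filter_by_node (matrix : List (List String)) (nodes : List String) : List (List String) :=
  nodes.foldl (fun final_output node =>
    final_output ++ [matrix.foldl (fun node_array row =>
      if node == PySem.List.pyGetD row 0 "" then node_array ++ [PySem.List.pyGetD row 2 ""]
      else node_array) [node]]) []

-- ===== PORT B =====
def filter_by_node_alt (matrix : List (List String)) (nodes : List String) : List (List String) :=
  if nodes = [] then []
  else
    let wanted : PySem.Set String := PySem.Set.ofList nodes
    let groups : PySem.Dict String (List String) :=
      matrix.foldl (fun groups row =>
        if PySem.Set.contains wanted (PySem.List.pyGetD row 0 "") then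
          groups.modify (PySem.List.pyGetD row 0 "") [] (fun l => l ++ [PySem.List.pyGetD row 2 ""])
        else groups) PySem.Dict.empty
    nodes.map (fun node => [node] ++ groups.getD node [])

-- ===== PRECONDITION & SPEC =====
-- Pre_ excludes exactly the inputs on which the Python A raises IndexError: nodes nonempty and
-- the matrix contains an empty row (row[0] raises) or a row shorter than 3 whose first entry
-- occurs in nodes (row[2] raises); with nodes empty A scans nothing and returns [].
def Pre_filter_by_node (matrix : List (List String)) (nodes : List String) : Prop :=
  nodes = [] ∨ ∀ row ∈ matrix, row ≠ [] ∧ (row.headI ∈ nodes → 3 ≤ row.length)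
instance (matrix : List (List String)) (nodes : List String) : Decidable (Pre_filter_by_node matrix nodes) := by unfold Pre_filter_by_node; infer_instance
def pvWitness_filter_by_node : List (List String) × List String :=
  ([["a", "t1", "5"], ["b", "t2", "7"], ["a", "t3", "9"]], ["a", "b"])

def Spec_filter_by_node (matrix : List (List String)) (nodes : List String) (out : List (List String)) : Prop := out = filter_by_node_alt matrix nodes
instance (matrix : List (List String)) (nodes : List String) (out : List (List String)) : Decidable (Spec_filter_by_node matrix nodes out) := by unfold Spec_filter_by_node; infer_instance

-- ===== CLAIM (what is proved, stated in full; the proofs are below) =====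
def Claim_equal_filter_by_node : Prop := ∀ (matrix : List (List String)) (nodes : List String), Dom_filter_by_node matrix nodes → Pre_filter_by_node matrix nodes → Spec_filter_by_node matrix nodes (filter_by_node matrix nodes)

-- ===== LEMMAS AND PROOFS =====

-- The grouping dict's entry for a node occurring in `nodes` is exactly A's inner scan.
theorem groups_getD (matrix : List (List String)) (nodes : List String)
    (node : String) (hmem : node ∈ nodes) (d : PySem.Dict String (List String)) :
    (matrix.foldl (fun groups row =>
      if PySem.Set.contains (PySem.Set.ofList nodes) (PySem.List.pyGetD row 0 "") then
        groups.modify (PySem.List.pyGetD row 0 "") [] (fun l => l ++ [PySem.List.pyGetD row 2 ""])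
      else groups) d).getD node []
    = matrix.foldl (fun acc row =>
        if node == PySem.List.pyGetD row 0 "" then acc ++ [PySem.List.pyGetD row 2 ""]
        else acc) (d.getD node []) := by
  induction matrix generalizing d with
  | nil => rfl
  | cons row rest ih =>
    simp only [List.foldl_cons]
    rw [ih]
    congr 1
    by_cases h : node = PySem.List.pyGetD row 0 ""
    · subst h
      simp [hmem, PySem.Dict.getD_modify_self]
    · by_cases hm : PySem.List.pyGetD row 0 "" ∈ nodes
      · simp [hm, h, PySem.Dict.getD_modify]
      · simp [hm, h]

-- ===== VERDICT (by name: the statement is the Claim_ definition above) =====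
theorem filter_by_node_spec : Claim_equal_filter_by_node := by
  intro matrix nodes _ _
  unfold Spec_filter_by_node filter_by_node filter_by_node_alt
  by_cases hn : nodes = []
  · subst hn; rfl
  · simp only [hn, if_false]
    rw [PySem.List.foldl_append_singleton_eq_map]
    simp only [List.nil_append]
    apply List.map_congr_left
    intro node hmem
    rw [groups_getD matrix nodes node hmem PySem.Dict.empty, PySem.Dict.getD_empty]
    rw [PySem.List.foldl_append_if, PySem.List.foldl_append_if]
    simp
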